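-- pv_equiv track=rewrite | github.com/aadie14/nestify | app/agentic/agents/code_intelligence_agent.py | _detect_external_services
-- ===== SOURCE A (Python) =====
-- def _detect_external_services(dependencies: list[str]) -> list[str]:
--     service_markers = {
--         "postgres": "postgresql",
--         "psycopg2": "postgresql",
--         "redis": "redis",
--         "pymongo": "mongodb",
--         "mysql": "mysql",
--         "boto3": "aws",
--         "stripe": "stripe",
--         "openai": "llm_api",
--         "httpx": "external_http",
--         "requests": "external_http",
--         "qdrant": "vector_db",
--         "neo4j": "graph_db",
--     }
--     services: set[str] = set()
--     for dep in dependencies: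
--         marker = service_markers.get(dep.lower())
--         if marker:
--             services.add(marker)
--     return sorted(services)
-- ===== SOURCE B (Python) =====
-- def _detect_external_services(dependencies: list[str]) -> list[str]:
--     # marker -> its trigger keys, listed in alphabetical marker order, so the
--     # filtered output is already sorted and already duplicate-free.
--     groups = [
--         ("aws", ["boto3"]),
--         ("external_http", ["httpx", "requests"]),
--         ("graph_db", ["neo4j"]),
--         ("llm_api", ["openai"]),
--         ("mongodb", ["pymongo"]),
--         ("mysql", ["mysql"]),
--         ("postgresql", ["postgres", "psycopg2"]),
--         ("redis", ["redis"]),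
--         ("stripe", ["stripe"]),
--         ("vector_db", ["qdrant"]),
--     ]
--     present = {d.lower() for d in dependencies}
--     return [svc for svc, keys in groups if any(k in present for k in keys)]
-- ===== Notes on version B (the rewrite author's own statement) =====
-- stated objective: alternative
-- what changed: Replaces the dep-driven dict-lookup loop, set accumulation and final sort by a grouped marker->keys table pre-listed in alphabetical marker order: B builds the set of lowercased dependency names once and filters the table by key membership, so the result list comes out sorted and deduplicated by construction with no sort and no result set.
import Mathlib
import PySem

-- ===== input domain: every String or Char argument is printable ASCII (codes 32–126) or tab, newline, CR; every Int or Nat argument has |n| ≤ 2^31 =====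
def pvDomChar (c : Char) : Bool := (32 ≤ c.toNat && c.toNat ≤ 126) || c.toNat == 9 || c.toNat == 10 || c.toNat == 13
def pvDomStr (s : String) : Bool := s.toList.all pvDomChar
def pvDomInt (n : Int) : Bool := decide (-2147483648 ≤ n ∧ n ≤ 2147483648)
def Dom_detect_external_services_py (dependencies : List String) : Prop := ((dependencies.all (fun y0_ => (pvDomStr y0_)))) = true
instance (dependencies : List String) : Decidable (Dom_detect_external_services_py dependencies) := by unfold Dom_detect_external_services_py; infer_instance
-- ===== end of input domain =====

-- B replaces A's dep-driven dict lookups + result set + sort by a grouped marker->keys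
-- table pre-listed in alphabetical marker order, filtered once against the set of
-- lowercased dependency names (objective: alternative decomposition).

-- ===== PORT A =====
def pvMarkersA : PySem.Dict String String := PySem.Dict.ofList
  [("postgres", "postgresql"), ("psycopg2", "postgresql"), ("redis", "redis"),
   ("pymongo", "mongodb"), ("mysql", "mysql"), ("boto3", "aws"),
   ("stripe", "stripe"), ("openai", "llm_api"), ("httpx", "external_http"),
   ("requests", "external_http"), ("qdrant", "vector_db"), ("neo4j", "graph_db")]

def detect_external_services_py (dependencies : List String) : List String :=
  let services : PySem.Set String :=
    dependencies.foldl (fun s dep =>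
      match pvMarkersA.get? (PySem.Str.lower dep) with
      | some marker => if marker == "" then s else PySem.Set.add s marker
      | none => s) PySem.Set.empty
  PySem.List.sorted services (fun x => x) false

-- ===== PORT B =====
def pvGroups : List (String × List String) :=
  [("aws", ["boto3"]),
   ("external_http", ["httpx", "requests"]),
   ("graph_db", ["neo4j"]),
   ("llm_api", ["openai"]),
   ("mongodb", ["pymongo"]),
   ("mysql", ["mysql"]),
   ("postgresql", ["postgres", "psycopg2"]),
   ("redis", ["redis"]),
   ("stripe", ["stripe"]),
   ("vector_db", ["qdrant"])]

def detect_external_services_py_alt (dependencies : List String) : List String :=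
  let present : PySem.Set String := PySem.Set.ofList (dependencies.map PySem.Str.lower)
  (pvGroups.filter (fun g => g.2.any (fun k => PySem.Set.contains present k))).map (fun g => g.1)

-- ===== PRECONDITION & SPEC =====
def Spec_detect_external_services_py (dependencies : List String) (out : List String) : Prop := out = detect_external_services_py_alt dependencies
instance (dependencies : List String) (out : List String) : Decidable (Spec_detect_external_services_py dependencies out) := by unfold Spec_detect_external_services_py; infer_instance

-- ===== CLAIM (what is proved, stated in full; the proofs are below) =====
def Claim_equal_detect_external_services_py : Prop := ∀ (dependencies : List String), Dom_detect_external_services_py dependencies → Spec_detect_external_services_py dependencies (detect_external_services_py dependencies)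

-- ===== LEMMAS AND PROOFS =====

-- membership in A's accumulated set
lemma memA (deps : List String) (s : List String) (y : String) :
    y ∈ deps.foldl (fun s dep =>
      match pvMarkersA.get? (PySem.Str.lower dep) with
      | some marker => if marker == "" then s else PySem.Set.add s marker
      | none => s) s ↔
    y ∈ s ∨ ∃ dep ∈ deps, pvMarkersA.get? (PySem.Str.lower dep) = some y ∧ y ≠ "" := by
  induction deps generalizing s with
  | nil => simp
  | cons d ds ih =>
    simp only [List.foldl_cons, ih, List.mem_cons]
    cases h : pvMarkersA.get? (PySem.Str.lower d) with
    | none =>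
      constructor
      · rintro (hy | ⟨dep, hd, hg, hne⟩)
        · exact Or.inl hy
        · exact Or.inr ⟨dep, Or.inr hd, hg, hne⟩
      · rintro (hy | ⟨dep, (rfl | hd), hg, hne⟩)
        · exact Or.inl hy
        · rw [h] at hg; exact absurd hg (by simp)
        · exact Or.inr ⟨dep, hd, hg, hne⟩
    | some m =>
      by_cases hm : m = ""
      · subst hm; simp only [BEq.rfl, if_true]
        constructor
        · rintro (hy | ⟨dep, hd, hg, hne⟩)
          · exact Or.inl hy
          · exact Or.inr ⟨dep, Or.inr hd, hg, hne⟩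
        · rintro (hy | ⟨dep, (rfl | hd), hg, hne⟩)
          · exact Or.inl hy
          · rw [h] at hg; cases hg; exact absurd rfl hne
          · exact Or.inr ⟨dep, hd, hg, hne⟩
      · simp only [beq_iff_eq, if_neg hm, PySem.Set.mem_add]
        constructor
        · rintro ((hy | rfl) | ⟨dep, hd, hg, hne⟩)
          · exact Or.inl hy
          · exact Or.inr ⟨d, Or.inl rfl, h, hm⟩
          · exact Or.inr ⟨dep, Or.inr hd, hg, hne⟩
        · rintro (hy | ⟨dep, (rfl | hd), hg, hne⟩)
          · exact Or.inl (Or.inl hy)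
          · rw [h] at hg; cases hg; exact Or.inl (Or.inr rfl)
          · exact Or.inr ⟨dep, hd, hg, hne⟩

lemma nodupA (deps : List String) (s : List String) (hs : s.Nodup) :
    (deps.foldl (fun s dep =>
      match pvMarkersA.get? (PySem.Str.lower dep) with
      | some marker => if marker == "" then s else PySem.Set.add s marker
      | none => s) s).Nodup := by
  induction deps generalizing s with
  | nil => exact hs
  | cons d ds ih =>
    simp only [List.foldl_cons]
    apply ih
    cases pvMarkersA.get? (PySem.Str.lower d) with
    | none => exact hs
    | some m =>
      by_cases hm : (m == "") = true
      · simp [hm, hs]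
      · simp only [hm, Bool.false_eq_true, if_false]
        exact PySem.Set.nodup_add _ _ hs

-- bridge: the flat dict and the grouped table describe the same relation
lemma dict_groups (k y : String) :
    pvMarkersA.get? k = some y ↔ ∃ g ∈ pvGroups, y = g.1 ∧ k ∈ g.2 := by
  constructor
  · intro h
    have hi := PySem.Dict.mem_items_of_get?_eq_some _ h
    have : pvMarkersA.items =
      [("postgres", "postgresql"), ("psycopg2", "postgresql"), ("redis", "redis"),
       ("pymongo", "mongodb"), ("mysql", "mysql"), ("boto3", "aws"),
       ("stripe", "stripe"), ("openai", "llm_api"), ("httpx", "external_http"),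
       ("requests", "external_http"), ("qdrant", "vector_db"), ("neo4j", "graph_db")] := by decide
    rw [this] at hi
    simp only [List.mem_cons, List.not_mem_nil, or_false, Prod.mk.injEq] at hi
    rcases hi with ⟨rfl, rfl⟩|⟨rfl, rfl⟩|⟨rfl, rfl⟩|⟨rfl, rfl⟩|⟨rfl, rfl⟩|⟨rfl, rfl⟩|⟨rfl, rfl⟩|⟨rfl, rfl⟩|⟨rfl, rfl⟩|⟨rfl, rfl⟩|⟨rfl, rfl⟩|⟨rfl, rfl⟩ <;> decide
  · rintro ⟨g, hg, rfl, hk⟩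
    fin_cases hg <;> simp only [List.mem_cons, List.not_mem_nil, or_false] at hk <;>
      rcases hk with rfl | rfl <;> decide

lemma groups_marker_ne (g : String × List String) (hg : g ∈ pvGroups) : g.1 ≠ "" := by
  fin_cases hg <;> decide

-- B's result characterised
lemma memB (present : PySem.Set String) (y : String) :
    y ∈ (pvGroups.filter (fun g => g.2.any (fun k => PySem.Set.contains present k))).map (fun g => g.1) ↔
    ∃ g ∈ pvGroups, y = g.1 ∧ ∃ k ∈ g.2, k ∈ present := by
  simp only [List.mem_map, List.mem_filter, List.any_eq_true, PySem.Set.contains_iff]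
  constructor
  · rintro ⟨g, ⟨hg, hk⟩, rfl⟩; exact ⟨g, hg, rfl, hk⟩
  · rintro ⟨g, hg, rfl, hk⟩; exact ⟨g, ⟨hg, hk⟩, rfl⟩

lemma markers_sorted : (pvGroups.map (fun g => g.1)).Pairwise (· < ·) := by
  have h : ∀ a b : String, (a < b) = (a.toList < b.toList) :=
    fun a b => propext String.lt_iff_toList_lt
  simp only [h]
  decide

lemma B_sublist (present : PySem.Set String) :
    ((pvGroups.filter (fun g => g.2.any (fun k => PySem.Set.contains present k))).map (fun g => g.1)).Sublist
      (pvGroups.map (fun g => g.1)) :=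
  List.Sublist.map _ List.filter_sublist

theorem detect_external_services_py_spec : Claim_equal_detect_external_services_py := by
  intro deps _
  unfold Spec_detect_external_services_py detect_external_services_py detect_external_services_py_alt
  simp only []
  apply PySem.List.sorted_id_eq_of_perm_of_pairwise
  · -- same members, both duplicate-free, hence a permutation
    have hBnd : ((pvGroups.filter (fun g => g.2.any (fun k =>
        PySem.Set.contains (PySem.Set.ofList (deps.map PySem.Str.lower)) k))).map (fun g => g.1)).Nodup :=
      (List.Nodup.sublist (B_sublist _) (markers_sorted.imp ne_of_lt))
    apply (List.perm_ext_iff_of_nodup hBnd (nodupA deps PySem.Set.empty List.nodup_nil)).mpr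
    intro y
    rw [memB, memA]
    simp only [PySem.Set.empty, List.not_mem_nil, false_or, PySem.Set.mem_ofList, List.mem_map]
    constructor
    · rintro ⟨g, hg, rfl, k, hk, dep, hd, hl⟩
      refine ⟨dep, hd, ?_, groups_marker_ne g hg⟩
      rw [hl, dict_groups]
      exact ⟨g, hg, rfl, hk⟩
    · rintro ⟨dep, hd, hg, hne⟩
      rw [dict_groups] at hg
      obtain ⟨g, hg, rfl, hk⟩ := hg
      exact ⟨g, hg, rfl, PySem.Str.lower dep, hk, dep, hd, rfl⟩
  · exact (markers_sorted.sublist (B_sublist _)).imp le_of_lt
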